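-- pv_equiv track=rewrite | github.com/Ssooob/BJalgorithm | 백준/Silver/23304. 아카라카/아카라카.py | aka_pel
-- ===== SOURCE A (Python) =====
-- def aka_pel(s):
--     P_flag = False
--     len_s = len(s)
--
--     if len_s == 1:
--         P_flag = True
--         return P_flag
--
--     if s == s[::-1]:
--         P_flag = aka_pel(s[:len_s//2])
--
--     return P_flag
-- ===== SOURCE B (Python) =====
-- def aka_pel(s):
--     k = len(s)
--     while k != 1:
--         p = s[:k]
--         if p != p[::-1]:
--             return False
--         k //= 2
--     return True
-- ===== Notes on version B (the rewrite author's own statement) =====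
-- stated objective: alternative
-- what changed: Replaces A's recursion on shrinking string copies with an iterative loop over a halving prefix-length k, checking the prefix s[:k] of the original string at each step.
import Mathlib
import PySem

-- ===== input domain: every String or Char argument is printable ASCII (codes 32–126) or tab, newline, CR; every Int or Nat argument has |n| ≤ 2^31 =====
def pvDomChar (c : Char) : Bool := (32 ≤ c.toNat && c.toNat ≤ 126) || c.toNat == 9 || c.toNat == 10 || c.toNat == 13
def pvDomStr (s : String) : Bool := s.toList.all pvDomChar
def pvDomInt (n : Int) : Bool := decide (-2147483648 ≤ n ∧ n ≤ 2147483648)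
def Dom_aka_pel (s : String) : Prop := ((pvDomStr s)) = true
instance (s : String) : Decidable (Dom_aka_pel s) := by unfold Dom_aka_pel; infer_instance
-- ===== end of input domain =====

-- B replaces A's recursion on shrinking string copies by an iterative loop over a halving
-- prefix length of the original string (objective: alternative decomposition, same cost).

-- ===== PORT A =====
-- A's recursion: P_flag = False; if len==1 return True; if s == s[::-1] recurse on s[:len//2].
-- Fuel (length+1) only makes the recursion total in Lean; inside Pre_ (s ≠ "") it never runs out.
-- s[::-1] on a list of chars is List.reverse; s[:len//2] with 0 ≤ len//2 is List.take (len/2)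
-- (Nat division = Python floor division on nonnegatives) — both exact here.
def akaA : Nat → List Char → Bool
  | 0, _ => false
  | fuel + 1, l =>
    if l.length = 1 then true
    else if l = l.reverse then akaA fuel (l.take (l.length / 2))
    else false

def aka_pel (s : String) : Bool := akaA (s.toList.length + 1) s.toList

-- ===== PORT B =====
-- B's loop: k = len(s); while k != 1: p = s[:k]; if p != p[::-1]: return False; k //= 2; return True.
-- Same fuel remark as for A; p = s[:k] is l.take k on the original list, exact for 0 ≤ k ≤ len.
def akaB : Nat → List Char → Nat → Bool
  | 0, _, _ => false
  | fuel + 1, l, k =>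
    if k ≠ 1 then
      let p := l.take k
      if p ≠ p.reverse then false else akaB fuel l (k / 2)
    else true

def aka_pel_alt (s : String) : Bool := akaB (s.toList.length + 1) s.toList s.toList.length

-- ===== PRECONDITION & SPEC =====
-- Pre_ excludes only the empty string, on which A raises RecursionError (and B's loop does not return).
def Pre_aka_pel (s : String) : Prop := s ≠ ""
instance (s : String) : Decidable (Pre_aka_pel s) := by unfold Pre_aka_pel; infer_instance
def pvWitness_aka_pel : String := "abcba"

def Spec_aka_pel (s : String) (out : Bool) : Prop := out = aka_pel_alt s
instance (s : String) (out : Bool) : Decidable (Spec_aka_pel s out) := by unfold Spec_aka_pel; infer_instance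

-- ===== CLAIM (what is proved, stated in full; the proofs are below) =====
def Claim_equal_aka_pel : Prop := ∀ (s : String), Dom_aka_pel s → Pre_aka_pel s → Spec_aka_pel s (aka_pel s)

-- ===== LEMMAS AND PROOFS =====

-- A on the prefix l.take k equals B's loop state (l, k), for any prefix length k ≤ |l|.
theorem akaA_take_eq_akaB (fuel : Nat) :
    ∀ (l : List Char) (k : Nat), k ≤ l.length → akaA fuel (l.take k) = akaB fuel l k := by
  induction fuel with
  | zero => intro l k _; rfl
  | succ n ih =>
    intro l k hk
    have hlen : (l.take k).length = k := by simp [List.length_take, Nat.min_eq_left hk]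
    simp only [akaA, akaB, hlen]
    by_cases h1 : k = 1
    · simp [h1]
    · rw [if_neg h1, if_pos h1]
      by_cases hp : l.take k = (l.take k).reverse
      · have htt : (l.take k).take (k / 2) = l.take (k / 2) := by
          rw [List.take_take, Nat.min_eq_left (Nat.div_le_self k 2)]
        rw [if_pos hp, if_neg (not_not_intro hp), htt]
        exact ih l (k / 2) (le_trans (Nat.div_le_self k 2) hk)
      · rw [if_neg hp, if_pos hp]

-- ===== VERDICT (by name: the statement is the Claim_ definition above) =====
theorem aka_pel_spec : Claim_equal_aka_pel := by
  intro s _ _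
  unfold Spec_aka_pel aka_pel aka_pel_alt
  have := akaA_take_eq_akaB (s.toList.length + 1) s.toList s.toList.length (le_refl _)
  rw [List.take_length] at this
  exact this
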